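-- pv_equiv track=rewrite | github.com/elikrok/cmmc_tool | enhanced_features/vendor_manager.py | check_access_control
-- ===== SOURCE A (Python) =====
-- from typing import Dict, List, Optional, Tuple
--
-- def check_access_control(config_content: str) -> Dict:
--     """Check access control for XR."""
--     lines = config_content.lower().split('\n')
--
--     # XR uses different enable secret syntax
--     enable_secret = any('enable secret' in line or 'secret' in line for line in lines)
--
--     # Check for SSH-only in VTY
--     ssh_only = False
--     in_vty = False
--
--     for line in lines:
--         line = line.strip()
--         if 'line template vty' in line or 'line console' in line:
--             in_vty = True
--             continue
--         if in_vty and line.startswith(('line ', 'interface ', 'router ')):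
--             in_vty = False
--         if in_vty and 'transport input ssh' in line:
--             ssh_only = True
--
--     return {
--         'enable_secret_present': enable_secret,
--         'ssh_only': ssh_only,
--         'passed': enable_secret and ssh_only
--     }
-- ===== SOURCE B (Python) =====
-- def check_access_control(config_content: str):
--     """Check access control for XR (section-grouping decomposition)."""
--     lines = config_content.lower().split('\n')
--
--     # 'enable secret' contains 'secret', so one substring test suffices
--     enable_secret = any('secret' in line for line in lines)
--
--     # Group stripped lines into vty/console sections, then search the sections.
--     sections = []
--     current = None
--     for raw in lines:
--         line = raw.strip()
--         if 'line template vty' in line or 'line console' in line: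
--             if current is not None:
--                 sections.append(current)
--             current = []
--         elif current is not None and line.startswith(('line ', 'interface ', 'router ')):
--             sections.append(current)
--             current = None
--         elif current is not None:
--             current.append(line)
--     if current is not None:
--         sections.append(current)
--
--     ssh_only = any('transport input ssh' in line for sec in sections for line in sec)
--
--     return {
--         'enable_secret_present': enable_secret,
--         'ssh_only': ssh_only,
--         'passed': enable_secret and ssh_only,
--     }
-- ===== Notes on version B (the rewrite author's own statement) =====
-- stated objective: alternative
-- what changed: Replaces the in_vty boolean flag machine with a single pass that groups stripped lines into explicit vty/console sections (a header opens a group, a line/interface/router prefix closes it) followed by a search over the collected sections; the redundant 'enable secret' test is dropped since 'secret' subsumes it.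
import Mathlib
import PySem

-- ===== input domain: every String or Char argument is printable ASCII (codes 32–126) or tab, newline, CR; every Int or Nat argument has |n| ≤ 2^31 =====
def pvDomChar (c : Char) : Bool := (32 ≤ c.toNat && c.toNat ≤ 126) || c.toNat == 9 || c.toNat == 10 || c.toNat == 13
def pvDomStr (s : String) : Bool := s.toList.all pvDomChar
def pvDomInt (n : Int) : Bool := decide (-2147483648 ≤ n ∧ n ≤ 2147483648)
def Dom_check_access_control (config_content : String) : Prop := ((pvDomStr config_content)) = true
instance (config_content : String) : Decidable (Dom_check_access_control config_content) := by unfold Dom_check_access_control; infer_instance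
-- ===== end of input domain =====

-- B replaces A's in_vty flag machine by explicit section grouping + a search over sections (objective: alternative decomposition).

-- ===== PORT A =====
-- one iteration of A's for-loop over (ssh_only, in_vty)
def pvStepA (st : Bool × Bool) (raw : String) : Bool × Bool :=
  let line := PySem.Str.strip raw
  if PySem.Str.isIn "line template vty" line || PySem.Str.isIn "line console" line then
    (st.1, true)
  else
    let in_vty := if st.2 && (PySem.Str.startswith line "line " || PySem.Str.startswith line "interface " || PySem.Str.startswith line "router ") then false else st.2
    let ssh_only := if in_vty && PySem.Str.isIn "transport input ssh" line then true else st.1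
    (ssh_only, in_vty)

def check_access_control (config_content : String) : List (String × Bool) :=
  let lines := (PySem.Str.split? (PySem.Str.lower config_content) "\n").getD []
  let enable_secret := lines.any (fun line => PySem.Str.isIn "enable secret" line || PySem.Str.isIn "secret" line)
  let ssh_only := (lines.foldl pvStepA (false, false)).1
  [("enable_secret_present", enable_secret), ("ssh_only", ssh_only), ("passed", enable_secret && ssh_only)]

-- ===== PORT B =====
-- one iteration of B's grouping loop over (sections, current)
def pvStepB (st : List (List String) × Option (List String)) (raw : String) :
    List (List String) × Option (List String) :=
  let line := PySem.Str.strip raw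
  if PySem.Str.isIn "line template vty" line || PySem.Str.isIn "line console" line then
    (match st.2 with
     | some c => st.1 ++ [c]
     | none => st.1, some [])
  else if st.2.isSome && (PySem.Str.startswith line "line " || PySem.Str.startswith line "interface " || PySem.Str.startswith line "router ") then
    (st.1 ++ [st.2.getD []], none)
  else
    match st.2 with
    | some c => (st.1, some (c ++ [line]))
    | none => (st.1, none)

def check_access_control_alt (config_content : String) : List (String × Bool) :=
  let lines := (PySem.Str.split? (PySem.Str.lower config_content) "\n").getD []
  let enable_secret := lines.any (fun line => PySem.Str.isIn "secret" line)
  let st := lines.foldl pvStepB ([], none)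
  let sections := match st.2 with
    | some c => st.1 ++ [c]
    | none => st.1
  let ssh_only := sections.any (fun sec => sec.any (fun line => PySem.Str.isIn "transport input ssh" line))
  [("enable_secret_present", enable_secret), ("ssh_only", ssh_only), ("passed", enable_secret && ssh_only)]

-- ===== PRECONDITION & SPEC =====
def Spec_check_access_control (config_content : String) (out : List (String × Bool)) : Prop := out = check_access_control_alt config_content
instance (config_content : String) (out : List (String × Bool)) : Decidable (Spec_check_access_control config_content out) := by unfold Spec_check_access_control; infer_instance

-- ===== CLAIM (what is proved, stated in full; the proofs are below) =====
def Claim_equal_check_access_control : Prop := ∀ (config_content : String), Dom_check_access_control config_content → Spec_check_access_control config_content (check_access_control config_content)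

-- ===== LEMMAS AND PROOFS =====

-- 'secret' occurring in a line is equivalent to A's two-substring test
lemma pvSecret_eq (line : String) :
    (PySem.Str.isIn "enable secret" line || PySem.Str.isIn "secret" line) = PySem.Str.isIn "secret" line := by
  cases h : PySem.Str.isIn "secret" line with
  | true => rw [Bool.or_true]
  | false =>
    rw [Bool.or_false]
    rw [PySem.Str.isIn_eq] at h ⊢
    rw [PySem.Chars.isIn_eq_false_iff] at h ⊢
    intro hc
    exact h (List.IsInfix.trans (by decide) hc)

-- the ssh value A accumulates, read off from B's grouping state
def pvSshOf (st : List (List String) × Option (List String)) : Bool :=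
  st.1.any (fun sec => sec.any (fun line => PySem.Str.isIn "transport input ssh" line)) ||
    (match st.2 with
     | some c => c.any (fun line => PySem.Str.isIn "transport input ssh" line)
     | none => false)

lemma pvStep_inv (raw : String) (stA : Bool × Bool) (stB : List (List String) × Option (List String))
    (h1 : stA.1 = pvSshOf stB) (h2 : stA.2 = stB.2.isSome) :
    (pvStepA stA raw).1 = pvSshOf (pvStepB stB raw) ∧ (pvStepA stA raw).2 = (pvStepB stB raw).2.isSome := by
  obtain ⟨ssh, invty⟩ := stA
  obtain ⟨secs, cur⟩ := stB
  simp only at h1 h2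
  subst h1 h2
  cases cur with
  | none =>
    simp only [pvStepA, pvStepB, pvSshOf]
    generalize PySem.Str.isIn "line template vty" (PySem.Str.strip raw) = b1
    generalize PySem.Str.isIn "line console" (PySem.Str.strip raw) = b2
    cases b1 <;> cases b2 <;> simp
  | some c =>
    simp only [pvStepA, pvStepB, pvSshOf]
    generalize PySem.Str.isIn "line template vty" (PySem.Str.strip raw) = b1
    generalize PySem.Str.isIn "line console" (PySem.Str.strip raw) = b2
    generalize PySem.Str.startswith (PySem.Str.strip raw) "line " = b3
    generalize PySem.Str.startswith (PySem.Str.strip raw) "interface " = b4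
    generalize PySem.Str.startswith (PySem.Str.strip raw) "router " = b5
    generalize h6 : PySem.Str.isIn "transport input ssh" (PySem.Str.strip raw) = b6
    cases b1 <;> cases b2 <;> cases b3 <;> cases b4 <;> cases b5 <;> cases b6 <;>
      simp_all
lemma pvFold_inv (lines : List String) (stA : Bool × Bool) (stB : List (List String) × Option (List String))
    (h1 : stA.1 = pvSshOf stB) (h2 : stA.2 = stB.2.isSome) :
    (lines.foldl pvStepA stA).1 = pvSshOf (lines.foldl pvStepB stB) ∧
      (lines.foldl pvStepA stA).2 = (lines.foldl pvStepB stB).2.isSome := by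
  induction lines generalizing stA stB with
  | nil => exact ⟨h1, h2⟩
  | cons l t ih =>
    obtain ⟨g1, g2⟩ := pvStep_inv l stA stB h1 h2
    simpa using ih _ _ g1 g2

-- ===== VERDICT (by name: the statement is the Claim_ definition above) =====
theorem check_access_control_spec : Claim_equal_check_access_control := by
  intro config_content _
  unfold Spec_check_access_control check_access_control check_access_control_alt
  simp only [pvSecret_eq]
  obtain ⟨h1, _⟩ := pvFold_inv (((PySem.Str.split? (PySem.Str.lower config_content) "\n").getD []))
    (false, false) ([], none) rfl rfl
  rw [h1]
  cases hfin : ((((PySem.Str.split? (PySem.Str.lower config_content) "\n").getD [])).foldl pvStepB ([], none)).2 with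
  | none => simp [pvSshOf, hfin]
  | some c => simp [pvSshOf, hfin, List.any_append]
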